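-- pv_equiv track=rewrite | github.com/Al3xanderMD/Python | Lab 2/ex5.py | replace_below_main_diagonal_with_zeros
-- ===== SOURCE A (Python) =====
-- def replace_below_main_diagonal_with_zeros(matrix):
--     if not matrix:
--         return []
--
--     num_rows, num_cols = len(matrix), len(matrix[0])
--
--     result_matrix = [[0] * num_cols for _ in range(num_rows)]
--
--     for i in range(num_rows):
--         for j in range(num_cols):
--             if i > j:
--                 matrix[i][j] = 0
--                 #result_matrix[i][j] = matrix[i][j]
--
--     return matrix
-- ===== SOURCE B (Python) =====
-- def replace_below_main_diagonal_with_zeros(matrix):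
--     if not matrix:
--         return []
--     num_cols = len(matrix[0])
--     result = []
--     k = 0  # how many leading zeros this row gets; saturates at num_cols
--     for row in matrix:
--         result.append([0] * k + row[k:])
--         if k < num_cols:
--             k += 1
--     return result
-- ===== Notes on version B (the rewrite author's own statement) =====
-- stated objective: alternative
-- what changed: Instead of A's nested index loops mutating matrix[i][j] in place, B builds a fresh matrix in a single pass with a saturating zero-count accumulator k (append [0]*k + row[k:], bump k up to num_cols), with no per-element comparison, no column loop and no mutation of the argument.
-- outside the precondition, e.g. on replace_below_main_diagonal_with_zeros([[1, 2], []]): A raises IndexError, B returns [[1, 2], [0]]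
import Mathlib
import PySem

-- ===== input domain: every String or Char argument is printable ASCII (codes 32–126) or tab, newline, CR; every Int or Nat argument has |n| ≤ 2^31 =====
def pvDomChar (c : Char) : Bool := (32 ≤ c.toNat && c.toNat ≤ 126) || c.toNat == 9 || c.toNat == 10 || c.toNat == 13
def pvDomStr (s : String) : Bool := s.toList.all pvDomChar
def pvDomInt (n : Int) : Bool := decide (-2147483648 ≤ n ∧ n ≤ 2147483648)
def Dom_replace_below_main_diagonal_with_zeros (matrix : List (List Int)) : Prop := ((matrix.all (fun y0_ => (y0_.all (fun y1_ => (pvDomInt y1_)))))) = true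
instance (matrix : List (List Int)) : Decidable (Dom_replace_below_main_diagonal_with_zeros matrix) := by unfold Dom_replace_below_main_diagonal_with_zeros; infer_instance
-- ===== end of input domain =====

-- B builds a fresh output matrix in one pass with a saturating zero-count accumulator instead of
-- A's nested index loops mutating the argument in place (alternative decomposition; same asymptotic
-- cost). A mutates its argument and returns it, B does not mutate; the equivalence proved here is
-- about the return value.

-- ===== PORT A =====
def replace_below_main_diagonal_with_zeros (matrix : List (List Int)) : List (List Int) :=
  if matrix = [] then []
  else
    let numRows : Int := PySem.List.len matrix
    let numCols : Int := PySem.List.len (PySem.List.pyGetD matrix 0 [])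
    (PySem.List.pyRange 0 numRows 1).foldl (fun m i =>
      (PySem.List.pyRange 0 numCols 1).foldl (fun m j =>
        if i > j then
          -- matrix[i][j] = 0  (indices in range under Pre_; pySetD/pyGetD are the total forms)
          PySem.List.pySetD m i (PySem.List.pySetD (PySem.List.pyGetD m i []) j 0)
        else m) m) matrix

-- ===== PORT B =====
def replace_below_main_diagonal_with_zeros_alt (matrix : List (List Int)) : List (List Int) :=
  if matrix = [] then []
  else
    let numCols : Int := PySem.List.len (PySem.List.pyGetD matrix 0 [])
    -- result = []; k = 0; for row in matrix: result.append([0]*k + row[k:]); if k < numCols: k += 1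
    (matrix.foldl (fun (st : List (List Int) × Int) row =>
        (st.1 ++ [PySem.List.pyRepeat [(0 : Int)] st.2 ++ PySem.List.slice row (some st.2) none],
         if st.2 < numCols then st.2 + 1 else st.2))
      ([], 0)).1

-- ===== PRECONDITION & SPEC =====
-- Pre_ excludes exactly the ragged inputs on which A raises IndexError: some row i shorter than
-- min(i, len(matrix[0])), whose below-diagonal entries A tries to index.
def Pre_replace_below_main_diagonal_with_zeros (matrix : List (List Int)) : Prop :=
  ∀ i : Nat, i < matrix.length → min i (matrix.headD []).length ≤ (matrix.getD i []).length
instance (matrix : List (List Int)) : Decidable (Pre_replace_below_main_diagonal_with_zeros matrix) := by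
  unfold Pre_replace_below_main_diagonal_with_zeros; infer_instance
def pvWitness_replace_below_main_diagonal_with_zeros : List (List Int) := [[1, 2], [3, 4]]

def Spec_replace_below_main_diagonal_with_zeros (matrix : List (List Int)) (out : List (List Int)) : Prop :=
  out = replace_below_main_diagonal_with_zeros_alt matrix
instance (matrix : List (List Int)) (out : List (List Int)) : Decidable (Spec_replace_below_main_diagonal_with_zeros matrix out) := by
  unfold Spec_replace_below_main_diagonal_with_zeros; infer_instance

-- ===== CLAIM (what is proved, stated in full; the proofs are below) =====
def Claim_equal_replace_below_main_diagonal_with_zeros : Prop :=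
  ∀ (matrix : List (List Int)), Dom_replace_below_main_diagonal_with_zeros matrix →
    Pre_replace_below_main_diagonal_with_zeros matrix →
    Spec_replace_below_main_diagonal_with_zeros matrix (replace_below_main_diagonal_with_zeros matrix)

-- ===== LEMMAS AND PROOFS =====

-- the row transform both programs compute at row index i (nc = number of columns)
def pvZeroRow (nc i : Nat) (r : List Int) : List Int :=
  List.replicate (min i nc) 0 ++ r.drop (min i nc)

-- row-level: A's inner column loop on one row equals the bulk row transform, if the row is long enough
lemma pv_row_fold (i : Nat) (r : List Int) :
    ∀ n : Nat, min i n ≤ r.length →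
      (List.range n).foldl (fun s j => if j < i then s.set j 0 else s) r
        = List.replicate (min i n) 0 ++ r.drop (min i n) := by
  intro n
  induction n with
  | zero => simp
  | succ n ih =>
    intro h
    rw [List.range_succ, List.foldl_append]
    by_cases hni : n < i
    · have hmin1 : min i (n + 1) = n + 1 := by omega
      have hmin0 : min i n = n := by omega
      have hlen : n < r.length := by omega
      rw [ih (by omega)]
      simp only [List.foldl, hni, if_pos, hmin0, hmin1]
      rw [List.set_append_right _ _ (by simp)]
      simp only [List.length_replicate, Nat.sub_self]
      rw [List.drop_eq_getElem_cons hlen, List.set_cons_zero, List.replicate_succ']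
      simp
    · have hmin : min i (n + 1) = min i n := by omega
      rw [ih (by omega)]
      simp [hni, hmin]

lemma pv_set_getD_self {α : Type} (m : List α) (i : Nat) (d : α) (h : i < m.length) :
    m.set i (m.getD i d) = m := by
  rw [List.getD_eq_getElem m d h, List.set_getElem_self]

-- matrix-level: A's inner j-loop equals setting row i to the folded row
lemma pv_inner_fold (nc : Nat) (i : Nat) (m : List (List Int)) (hi : i < m.length) :
    (List.range nc).foldl (fun s j =>
        if j < i then s.set i ((s.getD i []).set j 0) else s) m
      = m.set i ((List.range nc).foldl (fun r j => if j < i then r.set j 0 else r) (m.getD i [])) := by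
  induction nc with
  | zero =>
    simp only [List.range_zero, List.foldl_nil]
    exact (pv_set_getD_self m i [] hi).symm
  | succ n ih =>
    rw [List.range_succ, List.foldl_append, List.foldl_append, ih]
    by_cases hni : n < i
    · simp only [List.foldl, hni, if_pos]
      have hgd : (m.set i ((List.range n).foldl (fun r j => if j < i then r.set j 0 else r) (m.getD i []))).getD i []
          = (List.range n).foldl (fun r j => if j < i then r.set j 0 else r) (m.getD i []) := by
        rw [List.getD_eq_getElem _ [] (by simpa using hi), List.getElem_set_self]
      rw [hgd, List.set_set]
    · simp [hni]

-- the partially processed matrix after the first k outer iterations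
def pvPartial (nc : Nat) (matrix : List (List Int)) (k : Nat) : List (List Int) :=
  ((matrix.take k).mapIdx fun i r => pvZeroRow nc i r) ++ matrix.drop k

lemma pv_partial_length (nc : Nat) (matrix : List (List Int)) (k : Nat) :
    (pvPartial nc matrix k).length = matrix.length := by
  simp [pvPartial]; omega

lemma pv_partial_getD (nc : Nat) (matrix : List (List Int)) (k : Nat) (hk : k < matrix.length) :
    (pvPartial nc matrix k).getD k [] = matrix[k] := by
  have hlen : ((matrix.take k).mapIdx fun i r => pvZeroRow nc i r).length = k := by
    simp [List.length_take]; omega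
  rw [pvPartial, List.getD_eq_getElem _ [] (by simp [List.length_take]; omega)]
  rw [List.getElem_append_right (by omega)]
  simp [hlen]

lemma pv_partial_succ (nc : Nat) (matrix : List (List Int)) (k : Nat) (hk : k < matrix.length) :
    (pvPartial nc matrix k).set k (pvZeroRow nc k matrix[k]) = pvPartial nc matrix (k + 1) := by
  have hlen : ((matrix.take k).mapIdx fun i r => pvZeroRow nc i r).length = k := by
    simp [List.length_take]; omega
  have htake : matrix.take (k + 1) = matrix.take k ++ [matrix[k]] := by
    rw [List.take_add_one, List.getElem?_eq_getElem hk]; rfl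
  rw [pvPartial, List.drop_eq_getElem_cons hk, List.set_append_right _ _ (by omega)]
  rw [pvPartial, htake, List.mapIdx_concat]
  simp only [hlen, Nat.sub_self, List.length_take, Nat.min_eq_left hk.le, List.append_assoc,
    List.singleton_append]
  rw [List.set_cons_zero]

-- the outer i-loop, in Nat form, reaches pvPartial k
lemma pv_outer_fold (matrix : List (List Int)) (nc : Nat)
    (hpre : ∀ i : Nat, i < matrix.length → min i nc ≤ (matrix.getD i []).length) :
    ∀ k : Nat, k ≤ matrix.length →
      (List.range k).foldl (fun m i =>
          (List.range nc).foldl (fun s j =>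
            if j < i then s.set i ((s.getD i []).set j 0) else s) m) matrix
        = pvPartial nc matrix k := by
  intro k
  induction k with
  | zero => simp [pvPartial]
  | succ k ih =>
    intro hk
    have hk' : k < matrix.length := by omega
    rw [List.range_succ, List.foldl_append, ih (by omega)]
    simp only [List.foldl]
    rw [pv_inner_fold nc k _ (by rw [pv_partial_length]; exact hk'),
        pv_partial_getD nc matrix k hk',
        pv_row_fold k _ nc (by
          have := hpre k hk'
          rwa [List.getD_eq_getElem matrix [] hk'] at this)]
    exact pv_partial_succ nc matrix k hk'

-- B's accumulator loop: starting with zero-count k (0 ≤ k ≤ nc) and accumulated prefix acc,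
-- the fold appends the rows transformed at indices k, k+1, … (the counter saturating at nc,
-- which pvZeroRow's min absorbs)
lemma pv_B_fold (nc : Nat) (xs : List (List Int)) :
    ∀ (acc : List (List Int)) (k : Nat), k ≤ nc →
      (xs.foldl (fun (st : List (List Int) × Int) row =>
          (st.1 ++ [PySem.List.pyRepeat [(0 : Int)] st.2 ++ PySem.List.slice row (some st.2) none],
           if st.2 < (nc : Int) then st.2 + 1 else st.2))
        (acc, (k : Int))).1
        = acc ++ xs.mapIdx (fun i r => pvZeroRow nc (k + i) r) := by
  induction xs with
  | nil => intro acc k _; simp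
  | cons x xs ih =>
    intro acc k hk
    simp only [List.foldl_cons]
    have hrow : PySem.List.pyRepeat [(0 : Int)] (k : Int) ++ PySem.List.slice x (some (k : Int)) none
        = pvZeroRow nc k x := by
      rw [PySem.List.pyRepeat_singleton, PySem.List.slice_from_natCast, pvZeroRow]
      have : min k nc = k := by omega
      simp [this]
    by_cases hlt : k < nc
    · have hc : ((k : Int) < (nc : Int)) = True := by simp; omega
      have h1 : (k : Int) + 1 = ((k + 1 : Nat) : Int) := by push_cast; ring
      simp only [hc, if_true, h1, hrow]
      rw [ih _ (k + 1) (by omega)]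
      rw [List.mapIdx_cons, List.append_assoc]
      simp only [List.singleton_append, Nat.add_zero]
      congr 1
      have hf : (fun (i : Nat) (r : List Int) => pvZeroRow nc (k + 1 + i) r)
          = fun (i : Nat) (r : List Int) => pvZeroRow nc (k + (i + 1)) r := by
        funext i r
        have : k + 1 + i = k + (i + 1) := by omega
        rw [this]
      rw [hf]
    · have hkeq : k = nc := by omega
      have hc : ¬ ((k : Int) < (nc : Int)) := by omega
      simp only [hc, if_false, hrow]
      rw [ih _ k hk]
      rw [List.mapIdx_cons, List.append_assoc]
      simp only [List.singleton_append, Nat.add_zero]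
      congr 1
      -- pvZeroRow nc (k + i) = pvZeroRow nc (k + (i+1)) when k = nc: both mins clamp to nc
      have hf : (fun (i : Nat) (r : List Int) => pvZeroRow nc (k + i) r)
          = fun (i : Nat) (r : List Int) => pvZeroRow nc (k + (i + 1)) r := by
        funext i r
        simp only [pvZeroRow]
        have h1 : min (k + i) nc = nc := by omega
        have h2 : min (k + (i + 1)) nc = nc := by omega
        rw [h1, h2]
      rw [hf]

-- B as a mapIdx of the row transform
lemma pv_B_eq_mapIdx (matrix : List (List Int)) (h : matrix ≠ []) :
    replace_below_main_diagonal_with_zeros_alt matrix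
      = matrix.mapIdx fun i r => pvZeroRow (matrix.headD []).length i r := by
  unfold replace_below_main_diagonal_with_zeros_alt
  rw [if_neg h]
  simp only [PySem.List.len_eq, PySem.List.pyGetD_zero]
  have hhead : matrix.getD 0 [] = matrix.headD [] := by cases matrix <;> simp
  rw [hhead]
  have h0 : ((0 : Nat) : Int) = (0 : Int) := rfl
  have := pv_B_fold (matrix.headD []).length matrix [] 0 (Nat.zero_le _)
  rw [h0] at this
  simpa using this

-- convert A's pyRange/pySetD loops to the Nat-range form used above
lemma pv_A_eq_fold (matrix : List (List Int)) (h : matrix ≠ []) :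
    replace_below_main_diagonal_with_zeros matrix
      = (List.range matrix.length).foldl (fun m i =>
          (List.range (matrix.headD []).length).foldl (fun s j =>
            if j < i then s.set i ((s.getD i []).set j 0) else s) m) matrix := by
  unfold replace_below_main_diagonal_with_zeros
  rw [if_neg h]
  simp only [PySem.List.len_eq, PySem.List.pyGetD_zero]
  have hhead : matrix.getD 0 [] = matrix.headD [] := by cases matrix <;> simp
  rw [hhead, PySem.List.pyRange_zero_nat matrix.length, List.foldl_map]
  congr 1
  funext m i
  rw [PySem.List.pyRange_zero_nat (matrix.headD []).length, List.foldl_map]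
  congr 1
  funext s j
  have hij : ((i : Int) > (j : Int)) = (j < i) := by simp
  simp only [hij]
  by_cases hji : j < i
  · simp [hji, PySem.List.pySetD_natCast, PySem.List.pyGetD_natCast]
  · simp [hji]

-- ===== VERDICT (by name: the statement is the Claim_ definition above) =====
theorem replace_below_main_diagonal_with_zeros_spec :
    Claim_equal_replace_below_main_diagonal_with_zeros := by
  unfold Claim_equal_replace_below_main_diagonal_with_zeros
  intro matrix _ hpre
  unfold Spec_replace_below_main_diagonal_with_zeros
  by_cases h : matrix = []
  · subst h; rfl
  · rw [pv_A_eq_fold matrix h, pv_B_eq_mapIdx matrix h]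
    rw [pv_outer_fold matrix (matrix.headD []).length hpre matrix.length le_rfl]
    simp [pvPartial]
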